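-- pv_equiv track=rewrite | github.com/osamajavedgorsi/Recursion-problems_py | power_of_3_by_recursion.py | is_POT
-- ===== SOURCE A (Python) =====
-- def is_POT(n):
--     if n==1:
--         return True
--     if n%3!=0:
--         return False
--     elif n<=0:
--         return False
--     else:
--         return is_POT(n//3)
-- ===== SOURCE B (Python) =====
-- def is_POT(n):
--     # n is a power of 3 iff it is a positive divisor of 3**19 (the largest
--     # power of 3 within the 32-bit input domain), since divisors of a prime
--     # power are exactly the smaller prime powers.
--     return n > 0 and 1162261467 % n == 0
-- ===== Notes on version B (the rewrite author's own statement) =====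
-- stated objective: alternative
-- what changed: Replaces the repeated-division recursion by a single O(1) divisibility test: n is a power of 3 iff n > 0 and n divides 3**19, the largest power of 3 in the 32-bit domain.
import Mathlib
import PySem

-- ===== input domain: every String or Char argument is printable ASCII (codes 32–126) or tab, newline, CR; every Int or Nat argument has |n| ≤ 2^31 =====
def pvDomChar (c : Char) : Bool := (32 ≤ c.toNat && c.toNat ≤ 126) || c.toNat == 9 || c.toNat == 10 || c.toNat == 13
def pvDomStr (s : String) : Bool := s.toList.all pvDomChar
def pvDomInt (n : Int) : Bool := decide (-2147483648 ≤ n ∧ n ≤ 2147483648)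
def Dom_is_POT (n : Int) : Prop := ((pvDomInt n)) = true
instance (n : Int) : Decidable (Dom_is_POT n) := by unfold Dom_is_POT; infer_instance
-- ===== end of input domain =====

-- B replaces the repeated-division recursion by a single divisibility test
-- (n > 0 and n ∣ 3^19, the largest power of 3 in the 32-bit input domain): alternative algorithm.


-- ===== PORT A =====
def is_POT (n : Int) : Bool :=
  if n = 1 then true
  else if PySem.Int.mod n 3 ≠ 0 then false
  else if n ≤ 0 then false
  else is_POT (PySem.Int.floordiv n 3)
termination_by n.toNat
decreasing_by
  rw [PySem.Int.floordiv_eq_ediv_of_pos (by norm_num)]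
  omega

-- ===== PORT B =====
def is_POT_alt (n : Int) : Bool :=
  if 0 < n then decide (PySem.Int.mod 1162261467 n = 0) else false

-- ===== PRECONDITION & SPEC =====
def Spec_is_POT (n : Int) (out : Bool) : Prop := out = is_POT_alt n
instance (n : Int) (out : Bool) : Decidable (Spec_is_POT n out) := by unfold Spec_is_POT; infer_instance

-- ===== CLAIM (what is proved, stated in full; the proofs are below) =====
def Claim_equal_is_POT : Prop := ∀ (n : Int), Dom_is_POT n → Spec_is_POT n (is_POT n)

-- ===== LEMMAS AND PROOFS =====

-- A returns true exactly on the powers of 3 (no size bound needed on A's side).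
theorem is_POT_iff (n : Int) : is_POT n = true ↔ ∃ k : Nat, n = 3 ^ k := by
  induction n using is_POT.induct with
  | case1 =>
      constructor
      · intro _; exact ⟨0, by norm_num⟩
      · intro _; rw [is_POT]; simp
  | case2 n h1 h2 =>
      rw [is_POT]
      simp only [if_neg h1, if_pos h2]
      constructor
      · intro h; cases h
      · rintro ⟨k, rfl⟩
        cases k with
        | zero => simp at h1
        | succ j =>
            exfalso; apply h2
            rw [PySem.Int.mod_eq_zero_iff_dvd]
            exact ⟨3 ^ j, by ring⟩
  | case3 n h1 h2 h3 =>
      rw [is_POT]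
      simp only [if_neg h1, if_neg h2, if_pos h3]
      constructor
      · intro h; cases h
      · rintro ⟨k, rfl⟩
        have : (0:Int) < 3 ^ k := pow_pos (by norm_num) k
        omega
  | case4 n h1 h2 h3 ih =>
      rw [is_POT]
      simp only [if_neg h1, if_neg h2, if_neg h3]
      rw [ih]
      have hdvd : (3:Int) ∣ n := by
        rw [← PySem.Int.mod_eq_zero_iff_dvd]; simpa using h2
      obtain ⟨m, rfl⟩ := hdvd
      have hfd : PySem.Int.floordiv (3 * m) 3 = m := by
        rw [PySem.Int.floordiv_eq_ediv_of_pos (by norm_num)]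
        omega
      rw [hfd]
      constructor
      · rintro ⟨j, rfl⟩
        exact ⟨j + 1, by ring⟩
      · rintro ⟨k, hk⟩
        cases k with
        | zero => exfalso; exact h1 (by simpa using hk)
        | succ j =>
            refine ⟨j, ?_⟩
            have : (3:Int) * m = 3 * 3 ^ j := by rw [hk]; ring
            linarith [this]

-- Within the 32-bit domain, B also returns true exactly on the powers of 3.
theorem is_POT_alt_iff (n : Int) (hd : Dom_is_POT n) :
    is_POT_alt n = true ↔ ∃ k : Nat, n = 3 ^ k := by
  have hdom : n ≤ 2147483648 := by
    simp [Dom_is_POT, pvDomInt] at hd; omega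
  unfold is_POT_alt
  constructor
  · intro h
    split at h
    · rename_i hpos
      rw [decide_eq_true_iff, PySem.Int.mod_eq_zero_iff_dvd] at h
      -- n is a positive divisor of 3^19
      have hn : ((n.toNat : Int)) = n := Int.toNat_of_nonneg (le_of_lt hpos)
      have hdvdN : n.toNat ∣ 3 ^ 19 := by
        have : n ∣ (3:Int) ^ 19 := by norm_num at h ⊢; exact h
        rw [← hn] at this
        exact_mod_cast Int.ofNat_dvd.mp (by exact_mod_cast this)
      obtain ⟨i, _, hi⟩ := (Nat.dvd_prime_pow Nat.prime_three).mp hdvdN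
      exact ⟨i, by rw [← hn, hi]; push_cast; ring⟩
    · cases h
  · rintro ⟨k, rfl⟩
    have hk19 : k ≤ 19 := by
      by_contra hk
      have h20 : (3:Int) ^ 20 ≤ 3 ^ k := pow_le_pow_right₀ (by norm_num) (by omega)
      norm_num at h20
      omega
    have hpos : (0:Int) < 3 ^ k := pow_pos (by norm_num) k
    rw [if_pos hpos, decide_eq_true_iff, PySem.Int.mod_eq_zero_iff_dvd]
    have : (3:Int) ^ k ∣ 3 ^ 19 := pow_dvd_pow 3 hk19
    norm_num at this ⊢
    exact this

-- ===== VERDICT (by name: the statement is the Claim_ definition above) =====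
theorem is_POT_spec : Claim_equal_is_POT := by
  intro n hd
  unfold Spec_is_POT
  by_cases h : ∃ k : Nat, n = 3 ^ k
  · rw [(is_POT_iff n).mpr h, ((is_POT_alt_iff n hd).mpr h).symm]
  · have h1 : is_POT n ≠ true := fun hc => h ((is_POT_iff n).mp hc)
    have h2 : is_POT_alt n ≠ true := fun hc => h ((is_POT_alt_iff n hd).mp hc)
    simp at h1 h2; rw [h1, h2]
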